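-- pv_equiv track=rewrite | github.com/FTDfangge/leetcode | production/leetcode/production/leetcode/production/leetcode/production/leetcode/medium/809_expressiveWords.py | is_expressive
-- ===== SOURCE A (Python) =====
-- def is_expressive(s: str, target: str) -> bool:
--     s_dict = []
--     for i in s:
--         if not s_dict:
--             s_dict.append([i, 1])
--             continue
--         if s_dict[-1][0] == i:
--             s_dict[-1][1] += 1
--         else:
--             s_dict.append([i, 1])
--     t_dict = []
--     for i in target:
--         if not t_dict:
--             t_dict.append([i, 1])
--             continue
--         if t_dict[-1][0] == i:
--             t_dict[-1][1] += 1
--         else: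
--             t_dict.append([i, 1])
--
--     if s_dict.__len__() != t_dict.__len__():
--         return False
--
--     ptr = 0
--     while ptr in range(s_dict.__len__()):
--         if s_dict[ptr][0] == t_dict[ptr][0]:
--             if s_dict[ptr][1] == t_dict[ptr][1]:
--                 ptr += 1
--                 continue
--             elif s_dict[ptr][1] - t_dict[ptr][1] >= 0 and s_dict[ptr][1] >= 3:
--                 ptr += 1
--                 continue
--             else:
--                 return False
--         else:
--             return False
--
--     return True
-- ===== SOURCE B (Python) =====
-- def is_expressive(s: str, target: str) -> bool:
--     i = j = 0
--     n, m = len(s), len(target)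
--     while i < n and j < m:
--         c = s[i]
--         if c != target[j]:
--             return False
--         i0, j0 = i, j
--         while i < n and s[i] == c:
--             i += 1
--         while j < m and target[j] == c:
--             j += 1
--         ls, lt = i - i0, j - j0
--         if not (ls == lt or (ls >= lt and ls >= 3)):
--             return False
--     return i == n and j == m
-- ===== Notes on version B (the rewrite author's own statement) =====
-- stated objective: faster
-- what changed: Replaced A's two run-length-encoding list builds plus a length check and indexed while loop over the RLE pairs with a direct two-pointer scan over the strings that compares run lengths in place, avoiding the intermediate list construction.
import Mathlib
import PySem

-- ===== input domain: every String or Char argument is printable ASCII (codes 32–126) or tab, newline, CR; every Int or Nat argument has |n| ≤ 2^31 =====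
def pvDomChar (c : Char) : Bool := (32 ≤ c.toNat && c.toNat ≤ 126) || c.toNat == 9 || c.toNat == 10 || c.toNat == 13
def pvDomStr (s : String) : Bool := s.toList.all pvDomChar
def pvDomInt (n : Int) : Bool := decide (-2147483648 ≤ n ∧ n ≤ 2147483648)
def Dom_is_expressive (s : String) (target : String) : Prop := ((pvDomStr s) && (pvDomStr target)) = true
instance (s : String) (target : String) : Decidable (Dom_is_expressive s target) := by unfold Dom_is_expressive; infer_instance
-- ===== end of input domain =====

-- B replaces A's RLE-list construction and indexed loop with a two-pointer run scan (same cost, no intermediate lists).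

-- ===== PORT A =====
-- one iteration of A's RLE-building loop body (mutating the last pair = dropLast ++ updated pair)
def pvRleStep (acc : List (Char × Int)) (c : Char) : List (Char × Int) :=
  match acc.getLast? with
  | none => acc ++ [(c, 1)]
  | some (lc, k) => if lc = c then acc.dropLast ++ [(lc, k + 1)] else acc ++ [(c, 1)]

def pvRle (l : List Char) : List (Char × Int) := l.foldl pvRleStep []

-- A's 'while ptr in range(len)' loop; indices stay in range whenever the loop runs
-- (ptr < length is the loop guard and the two lists have equal length when called), so getD's default is never read.
def pvLoopA (sd td : List (Char × Int)) (ptr : Nat) : Bool :=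
  if ptr < sd.length then
    let sp := sd.getD ptr (' ', 0)
    let tp := td.getD ptr (' ', 0)
    if sp.1 = tp.1 then
      if sp.2 = tp.2 then pvLoopA sd td (ptr + 1)
      else if sp.2 - tp.2 ≥ 0 ∧ sp.2 ≥ 3 then pvLoopA sd td (ptr + 1)
      else false
    else false
  else true
termination_by sd.length - ptr

def is_expressive (s : String) (target : String) : Bool :=
  let s_dict := pvRle s.toList
  let t_dict := pvRle target.toList
  if s_dict.length ≠ t_dict.length then false
  else pvLoopA s_dict t_dict 0

-- ===== PORT B =====
-- two-pointer scan: advance both pointers past the current character's run, compare run lengths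
def pvGo : List Char → List Char → Bool
  | [], [] => true
  | [], _ :: _ => false
  | _ :: _, [] => false
  | a :: as, b :: bs =>
    if a ≠ b then false
    else
      let ls := 1 + (as.takeWhile (· == a)).length
      let lt := 1 + (bs.takeWhile (· == a)).length
      if ls = lt ∨ (ls ≥ lt ∧ ls ≥ 3) then
        pvGo (as.dropWhile (· == a)) (bs.dropWhile (· == a))
      else false
termination_by s t => s.length
decreasing_by
  simpa using Nat.lt_succ_of_le (List.length_dropWhile_le _ _)

def is_expressive_alt (s : String) (target : String) : Bool :=
  pvGo s.toList target.toList

-- ===== PRECONDITION & SPEC =====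
def Spec_is_expressive (s : String) (target : String) (out : Bool) : Prop := out = is_expressive_alt s target
instance (s : String) (target : String) (out : Bool) : Decidable (Spec_is_expressive s target out) := by unfold Spec_is_expressive; infer_instance

-- ===== CLAIM (what is proved, stated in full; the proofs are below) =====
def Claim_equal_is_expressive : Prop := ∀ (s : String) (target : String), Dom_is_expressive s target → Spec_is_expressive s target (is_expressive s target)

-- ===== LEMMAS AND PROOFS =====

-- front-recursive characterisation of A's RLE build
def pvRleAux (c : Char) (k : Int) : List Char → List (Char × Int)
  | [] => [(c, k)]
  | d :: ds => if c = d then pvRleAux c (k + 1) ds else (c, k) :: pvRleAux d 1 ds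

def pvRleF : List Char → List (Char × Int)
  | [] => []
  | c :: cs => pvRleAux c 1 cs

-- pairwise check equivalent to A's length test + loop
def pvCheck : List (Char × Int) → List (Char × Int) → Bool
  | [], [] => true
  | [], _ :: _ => false
  | _ :: _, [] => false
  | (c1, k1) :: r1, (c2, k2) :: r2 =>
    if c1 = c2 then
      if k1 = k2 then pvCheck r1 r2
      else if k1 - k2 ≥ 0 ∧ k1 ≥ 3 then pvCheck r1 r2
      else false
    else false

theorem pvRleStep_ne_nil (acc : List (Char × Int)) (c : Char) : pvRleStep acc c ≠ [] := by
  unfold pvRleStep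
  cases h : acc.getLast? with
  | none => simp
  | some p => cases p with | mk lc k => dsimp; split <;> simp

theorem pvFoldl_append (l : List Char) : ∀ (acc s : List (Char × Int)), s ≠ [] →
    l.foldl pvRleStep (acc ++ s) = acc ++ l.foldl pvRleStep s := by
  induction l with
  | nil => intro acc s _; simp
  | cons d ds ih =>
    intro acc s hs
    rcases List.eq_nil_or_concat s with rfl | ⟨s', p, rfl⟩
    · exact absurd rfl hs
    · simp only [List.concat_eq_append]
      have hstep : pvRleStep (acc ++ (s' ++ [p])) d = acc ++ pvRleStep (s' ++ [p]) d := by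
        unfold pvRleStep
        rw [show acc ++ (s' ++ [p]) = (acc ++ s') ++ [p] by simp,
            List.getLast?_concat, List.getLast?_concat]
        cases p with
        | mk lc k =>
          dsimp; split
          · rw [List.dropLast_concat, List.dropLast_concat]; simp
          · simp
      simp only [List.foldl_cons, hstep]
      exact ih _ _ (pvRleStep_ne_nil _ d)

theorem pvFoldl_single (l : List Char) : ∀ (c : Char) (k : Int),
    l.foldl pvRleStep [(c, k)] = pvRleAux c k l := by
  induction l with
  | nil => intro c k; simp [pvRleAux]
  | cons d ds ih =>
    intro c k
    simp only [List.foldl_cons]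
    by_cases h : c = d
    · have : pvRleStep [(c, k)] d = [(c, k + 1)] := by
        simp [pvRleStep, h]
      rw [this, ih, pvRleAux, if_pos h]
    · have : pvRleStep [(c, k)] d = [(c, k)] ++ [(d, 1)] := by
        simp [pvRleStep, h]
      rw [this, pvFoldl_append ds [(c,k)] [(d,1)] (by simp), ih]
      simp [pvRleAux, h]

theorem pvRle_eq_F (l : List Char) : pvRle l = pvRleF l := by
  cases l with
  | nil => rfl
  | cons c cs =>
    show cs.foldl pvRleStep (pvRleStep [] c) = pvRleAux c 1 cs
    have : pvRleStep [] c = [(c, 1)] := by simp [pvRleStep]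
    rw [this, pvFoldl_single]

-- run splitting: pvRleAux peels a maximal run
theorem pvRleAux_run (l : List Char) : ∀ (c : Char) (k : Int),
    pvRleAux c k l = (c, k + ((l.takeWhile (· == c)).length : Int)) :: pvRleF (l.dropWhile (· == c)) := by
  induction l with
  | nil => intro c k; simp [pvRleAux, pvRleF]
  | cons d ds ih =>
    intro c k
    by_cases h : c = d
    · subst h
      rw [pvRleAux, if_pos rfl, ih]
      simp only [List.takeWhile_cons, List.dropWhile_cons]
      simp only [BEq.rfl, if_pos]
      simp only [List.length_cons]
      congr 1
      push_cast
      ring_nf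
    · rw [pvRleAux, if_neg h]
      have hne : (d == c) = false := by simp; exact fun hh => h hh.symm
      simp [hne, pvRleF]

-- collapse pvCheck's nested if into a single disjunctive condition
theorem pv_if_collapse (p q : Prop) [Decidable p] [Decidable q] (C : Bool) :
    (if p then C else if q then C else false) = if p ∨ q then C else false := by
  split_ifs <;> tauto

-- B's scan equals the pairwise check over the RLE forms
theorem pvGo_eq_check_aux : ∀ (n : Nat) (s t : List Char), s.length ≤ n →
    pvGo s t = pvCheck (pvRleF s) (pvRleF t) := by
  intro n
  induction n with
  | zero =>
    intro s t hs
    have hsnil : s = [] := List.eq_nil_of_length_eq_zero (Nat.le_zero.mp hs)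
    subst hsnil
    cases t with
    | nil => simp [pvGo, pvCheck, pvRleF]
    | cons b bs =>
      rw [show pvRleF (b :: bs) = pvRleAux b 1 bs from rfl, pvRleAux_run]
      simp [pvGo, pvCheck, pvRleF]
  | succ n ih =>
    intro s t hs
    cases s with
    | nil =>
      cases t with
      | nil => simp [pvGo, pvCheck, pvRleF]
      | cons b bs =>
        rw [show pvRleF (b :: bs) = pvRleAux b 1 bs from rfl, pvRleAux_run]
        simp [pvGo, pvCheck, pvRleF]
    | cons a as =>
      cases t with
      | nil =>
        rw [show pvRleF (a :: as) = pvRleAux a 1 as from rfl, pvRleAux_run]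
        simp [pvGo, pvCheck, pvRleF]
      | cons b bs =>
        rw [show pvRleF (a :: as) = pvRleAux a 1 as from rfl, pvRleAux_run,
            show pvRleF (b :: bs) = pvRleAux b 1 bs from rfl, pvRleAux_run]
        by_cases hab : a = b
        · subst hab
          rw [pvGo]
          simp only [ne_eq, not_true_eq_false, if_false]
          rw [pvCheck, if_pos rfl, pv_if_collapse]
          set la := (as.takeWhile (· == a)).length with hla
          set lb := (bs.takeWhile (· == a)).length with hlb
          have hcond : (1 + la = 1 + lb ∨ 1 + la ≥ 1 + lb ∧ 1 + la ≥ 3) ↔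
              ((1 : Int) + (la : Int) = 1 + (lb : Int) ∨
               (1 : Int) + (la : Int) - (1 + (lb : Int)) ≥ 0 ∧ (1 : Int) + (la : Int) ≥ 3) := by
            omega
          have hrec : pvGo (as.dropWhile (· == a)) (bs.dropWhile (· == a)) =
              pvCheck (pvRleF (as.dropWhile (· == a))) (pvRleF (bs.dropWhile (· == a))) := by
            apply ih
            have := List.length_dropWhile_le (· == a) as
            have hs' : as.length ≤ n := by simpa using Nat.succ_le_succ_iff.mp hs
            omega
          rw [if_congr hcond hrec rfl]
        · rw [pvGo]
          simp only [ne_eq, hab, not_false_eq_true, if_true]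
          rw [pvCheck, if_neg hab]

-- length mismatch forces pvCheck to false
theorem pvCheck_len_ne : ∀ (xs ys : List (Char × Int)), xs.length ≠ ys.length → pvCheck xs ys = false := by
  intro xs
  induction xs with
  | nil => intro ys h; cases ys with
    | nil => exact absurd rfl h
    | cons y ys => rfl
  | cons x xs ih =>
    intro ys h
    cases ys with
    | nil => rfl
    | cons y ys =>
      obtain ⟨c1, k1⟩ := x; obtain ⟨c2, k2⟩ := y
      rw [pvCheck]
      have h' : xs.length ≠ ys.length := by simp at h; omega
      split_ifs <;> first | exact ih ys h' | rfl

-- A's indexed loop equals the pairwise check when the lengths agree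
theorem pvLoopA_eq_check : ∀ (k : Nat) (sd td : List (Char × Int)) (ptr : Nat),
    sd.length = td.length → sd.length - ptr = k →
    pvLoopA sd td ptr = pvCheck (sd.drop ptr) (td.drop ptr) := by
  intro k
  induction k with
  | zero =>
    intro sd td ptr hlen hk
    have h1 : ¬ ptr < sd.length := by omega
    rw [pvLoopA, if_neg h1, List.drop_eq_nil_of_le (by omega), List.drop_eq_nil_of_le (by omega)]
    rfl
  | succ k ih =>
    intro sd td ptr hlen hk
    have h1 : ptr < sd.length := by omega
    have h2 : ptr < td.length := by omega
    rw [pvLoopA, if_pos h1]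
    rw [List.drop_eq_getElem_cons h1, List.drop_eq_getElem_cons h2]
    have hg1 : sd.getD ptr (' ', 0) = sd[ptr] := List.getD_eq_getElem sd _ h1
    have hg2 : td.getD ptr (' ', 0) = td[ptr] := List.getD_eq_getElem td _ h2
    rcases hsp : sd[ptr] with ⟨c1, k1⟩
    rcases htp : td[ptr] with ⟨c2, k2⟩
    simp only [hg1, hg2, hsp, htp]
    rw [pvCheck]
    have hih : pvLoopA sd td (ptr + 1) = pvCheck (sd.drop (ptr + 1)) (td.drop (ptr + 1)) :=
      ih sd td (ptr + 1) hlen (by omega)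
    split_ifs <;> first | exact hih | rfl

theorem pvA_eq_check (s t : String) :
    is_expressive s t = pvCheck (pvRleF s.toList) (pvRleF t.toList) := by
  show (if (pvRle s.toList).length ≠ (pvRle t.toList).length then false
        else pvLoopA (pvRle s.toList) (pvRle t.toList) 0) = _
  rw [pvRle_eq_F, pvRle_eq_F]
  by_cases h : (pvRleF s.toList).length = (pvRleF t.toList).length
  · rw [if_neg (by simpa using h)]
    rw [pvLoopA_eq_check ((pvRleF s.toList).length - 0) _ _ 0 h rfl]
    simp
  · rw [if_pos (by simpa using h), (pvCheck_len_ne _ _ h).symm]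

-- ===== VERDICT (by name: the statement is the Claim_ definition above) =====
theorem is_expressive_spec : Claim_equal_is_expressive := by
  intro s t _
  show is_expressive s t = is_expressive_alt s t
  rw [pvA_eq_check, is_expressive_alt,
      pvGo_eq_check_aux s.toList.length s.toList t.toList le_rfl]
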